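-- pv_equiv track=rewrite | github.com/Dojodonkey/PY110 | Wiki_110/28_group_by_2.py | solution
-- ===== SOURCE A (Python) =====
-- def solution(strng):
--     if not strng:
--         return []
--
--     result = []
--     for i in range(0, len(strng), 2):
--         if i + 1 < len(strng):
--             result.append(strng[i] + strng[i +1])
--         else:
--             result.append(strng[i] + '_')
--
--     return result
-- ===== SOURCE B (Python) =====
-- def solution(strng):
--     chunks = []
--     buf = ''
--     for ch in strng:
--         buf += ch
--         if len(buf) == 2:
--             chunks.append(buf)
--             buf = ''
--     if buf:
--         chunks.append(buf + '_')
--     return chunks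
-- ===== Notes on version B (the rewrite author's own statement) =====
-- stated objective: alternative
-- what changed: Replaces A's stride-2 index loop with lookahead/branching by a character-by-character streaming pass carrying a buffer accumulator: each character is pushed into the buffer, a full 2-char buffer is flushed to the result, and a leftover 1-char buffer is padded with '_' after the loop; no indexing or slicing at all.
import Mathlib
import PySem

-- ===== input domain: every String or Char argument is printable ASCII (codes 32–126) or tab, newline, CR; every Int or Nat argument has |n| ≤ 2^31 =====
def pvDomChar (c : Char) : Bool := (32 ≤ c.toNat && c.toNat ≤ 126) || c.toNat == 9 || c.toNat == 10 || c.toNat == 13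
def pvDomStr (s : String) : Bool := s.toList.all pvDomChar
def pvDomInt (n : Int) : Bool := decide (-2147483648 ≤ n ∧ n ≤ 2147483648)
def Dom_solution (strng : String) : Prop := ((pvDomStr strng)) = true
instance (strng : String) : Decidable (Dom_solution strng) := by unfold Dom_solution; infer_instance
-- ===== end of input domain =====

-- B replaces A's stride-2 index loop by a character-by-character streaming pass with a
-- buffer accumulator (flush on 2, pad a leftover after the loop) — objective: alternative.

-- ===== PORT A =====
-- strng[i] + strng[i+1] concatenates two single characters; ported as String.ofList of the two
-- characters (exact: i, and i+1 when that branch is taken, are always in range, so pyGetD's default ' ' is never used).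
def solution (strng : String) : List String :=
  if strng = "" then []
  else
    (PySem.List.pyRange 0 (strng.toList.length : Int) 2).foldl
      (fun result i =>
        if i + 1 < (strng.toList.length : Int) then
          result ++ [String.ofList [PySem.List.pyGetD strng.toList i ' ',
                                    PySem.List.pyGetD strng.toList (i + 1) ' ']]
        else
          result ++ [String.ofList [PySem.List.pyGetD strng.toList i ' ', '_']]) []

-- ===== PORT B =====
-- the Python str buffer 'buf' is represented as a List Char (exact on all strings)
def solution_alt (strng : String) : List String :=
  let st := strng.toList.foldl
    (fun (st : List String × List Char) ch =>
      let buf := st.2 ++ [ch]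
      if buf.length = 2 then (st.1 ++ [String.ofList buf], []) else (st.1, buf))
    ([], [])
  if st.2 ≠ [] then st.1 ++ [String.ofList (st.2 ++ ['_'])] else st.1

-- ===== PRECONDITION & SPEC =====
def Spec_solution (strng : String) (out : List String) : Prop := out = solution_alt strng
instance (strng : String) (out : List String) : Decidable (Spec_solution strng out) := by unfold Spec_solution; infer_instance

-- ===== CLAIM =====
def Claim_equal_solution : Prop := ∀ (strng : String), Dom_solution strng → Spec_solution strng (solution strng)

-- ===== LEMMAS AND PROOFS =====

-- common recursive characterisation: the list of 2-char chunks, last one padded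
def pairsOf : List Char → List String
  | a :: b :: rest => String.ofList [a, b] :: pairsOf rest
  | [c] => [String.ofList [c, '_']]
  | [] => []

def pvChunk (xs : List Char) (k : Nat) : String :=
  if 2 * k + 1 < xs.length then String.ofList [xs.getD (2 * k) ' ', xs.getD (2 * k + 1) ' ']
  else String.ofList [xs.getD (2 * k) ' ', '_']

-- B's loop body, named so the invariant can state it
def pvF : List String × List Char → Char → List String × List Char := fun st ch =>
  let buf := st.2 ++ [ch]
  if buf.length = 2 then (st.1 ++ [String.ofList buf], []) else (st.1, buf)

-- range(0, b, 2) enumerates the even numbers 2*k, k < ⌈b/2⌉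
lemma pv_range2 (b : Nat) :
    PySem.List.pyRange 0 (b : Int) 2 = (List.range ((b + 1) / 2)).map (fun k => ((2 * k : Nat) : Int)) := by
  rw [PySem.List.pyRange_of_pos _ _ (by norm_num : (0:Int) < 2)]
  by_cases hb : 0 < b
  · rw [if_pos (by exact_mod_cast hb)]
    have h1 : ((b : Int) - 0 + 2 - 1) = ((b + 1 : Nat) : Int) := by push_cast; ring
    rw [h1, show (2:Int) = ((2:Nat):Int) from rfl, ← Int.natCast_ediv, Int.toNat_natCast]
    exact List.map_congr_left (fun k _ => by push_cast; ring)
  · have hb0 : b = 0 := by omega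
    subst hb0; simp

-- A's fold equals the chunk map
lemma solA_eq_mapchunk (strng : String) (h : strng ≠ "") :
    solution strng = (List.range ((strng.toList.length + 1) / 2)).map (pvChunk strng.toList) := by
  unfold solution
  rw [if_neg h]
  have hbody : (fun (result : List String) (i : Int) =>
      if i + 1 < (strng.toList.length : Int) then
        result ++ [String.ofList [PySem.List.pyGetD strng.toList i ' ',
                                  PySem.List.pyGetD strng.toList (i + 1) ' ']]
      else
        result ++ [String.ofList [PySem.List.pyGetD strng.toList i ' ', '_']])
      = fun result i => result ++
          [if i + 1 < (strng.toList.length : Int) then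
             String.ofList [PySem.List.pyGetD strng.toList i ' ',
                            PySem.List.pyGetD strng.toList (i + 1) ' ']
           else String.ofList [PySem.List.pyGetD strng.toList i ' ', '_']] := by
    funext r i; exact (apply_ite (fun x => r ++ [x]) _ _ _).symm
  rw [hbody, PySem.List.foldl_append_singleton_eq_map, List.nil_append, pv_range2, List.map_map]
  refine List.map_congr_left ?_
  intro k hk
  simp only [Function.comp_apply, pvChunk]
  by_cases h2 : 2 * k + 1 < strng.toList.length
  · rw [if_pos (by exact_mod_cast h2), if_pos h2,
        show ((2*k:Nat):Int) + 1 = ((2*k+1:Nat):Int) from by push_cast; ring,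
        PySem.List.pyGetD_natCast, PySem.List.pyGetD_natCast]
  · rw [if_neg (by intro hcon; exact h2 (by exact_mod_cast hcon)), if_neg h2,
        PySem.List.pyGetD_natCast]

-- the chunk map is pairsOf
lemma mapchunk_eq_pairsOf (xs : List Char) :
    (List.range ((xs.length + 1) / 2)).map (pvChunk xs) = pairsOf xs := by
  induction xs using pairsOf.induct with
  | case1 a b rest ih =>
    have hlen : (a :: b :: rest).length = rest.length + 2 := by simp
    rw [pairsOf, hlen, show (rest.length + 2 + 1) / 2 = (rest.length + 1) / 2 + 1 from by omega,
        List.range_succ_eq_map, List.map_cons, List.map_map]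
    have h0 : pvChunk (a :: b :: rest) 0 = String.ofList [a, b] := by
      simp [pvChunk]
    rw [h0]
    congr 1
    rw [← ih]
    refine List.map_congr_left ?_
    intro k _
    simp only [Function.comp_apply, pvChunk, hlen]
    have hiff : 2 * (k + 1) + 1 < rest.length + 2 ↔ 2 * k + 1 < rest.length := by omega
    have hg1 : (a :: b :: rest).getD (2 * (k + 1)) ' ' = rest.getD (2 * k) ' ' := by
      show (a :: b :: rest).getD (2 * k + 2) ' ' = _
      simp
    have hg2 : (a :: b :: rest).getD (2 * (k + 1) + 1) ' ' = rest.getD (2 * k + 1) ' ' := by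
      show (a :: b :: rest).getD (2 * k + 3) ' ' = _
      simp
    rw [hg1, hg2]
    by_cases h2 : 2 * k + 1 < rest.length
    · rw [if_pos (hiff.mpr h2), if_pos h2]
    · rw [if_neg (fun hc => h2 (hiff.mp hc)), if_neg h2]
  | case2 c => simp [pvChunk, pairsOf, List.range_succ]
  | case3 => simp [pairsOf]

-- B's fold invariant
lemma solB_inv (xs : List Char) : ∀ (acc : List String),
    (let st := xs.foldl pvF (acc, []);
     if st.2 ≠ [] then st.1 ++ [String.ofList (st.2 ++ ['_'])] else st.1) = acc ++ pairsOf xs := by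
  induction xs using pairsOf.induct with
  | case1 a b rest ih =>
    intro acc
    have h1 : pvF (acc, []) a = (acc, [a]) := rfl
    have h2 : pvF (acc, [a]) b = (acc ++ [String.ofList [a, b]], []) := rfl
    show (let st := List.foldl pvF (pvF (pvF (acc, []) a) b) rest;
      if st.2 ≠ [] then st.1 ++ [String.ofList (st.2 ++ ['_'])] else st.1) = acc ++ pairsOf (a :: b :: rest)
    rw [h1, h2, ih (acc ++ [String.ofList [a, b]]), pairsOf, List.append_assoc]
    rfl
  | case2 c =>
    intro acc
    simp [pairsOf, pvF]
  | case3 =>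
    intro acc
    simp [pairsOf]

-- ===== VERDICT =====
theorem solution_spec : Claim_equal_solution := by
  intro strng _
  unfold Spec_solution
  have hB : solution_alt strng = pairsOf strng.toList := by
    have h := solB_inv strng.toList []
    rw [List.nil_append] at h
    exact h
  by_cases hs : strng = ""
  · subst hs
    rw [hB]
    rfl
  · rw [hB, solA_eq_mapchunk strng hs, mapchunk_eq_pairsOf]
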